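-- pv_equiv track=rewrite | github.com/HelgDemidov/solid-verifier | solid_dashboard/adapters/import_graph_adapter.py | _resolve_external_layer
-- ===== SOURCE A (Python) =====
-- from typing import Any, Dict, List, Optional, Set, Tuple
--
-- def _resolve_external_layer(
--
--     module_name: str,
--     external_layer_config: Dict[str, List[str]],
-- ) -> Optional[str]:
--     """
--     Ищет внешний слой для third-party модуля.
--
--     Пример:
--     - модуль "sqlalchemy.orm"
--     - внешний слой "db_libs": ["sqlalchemy"]
--     - результат: "db_libs"
--     """
--     for layer_name, package_prefixes in external_layer_config.items():
--         for package_prefix in package_prefixes: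
--             if (
--                 module_name == package_prefix
--                 or module_name.startswith(f"{package_prefix}.")
--             ):
--                 return layer_name
--     return None
-- ===== SOURCE B (Python) =====
-- def _resolve_external_layer(
--     module_name: str,
--     external_layer_config,
-- ):
--     # Precompute the set of dotted-boundary prefixes of module_name
--     # ('a.b.c' -> {'a', 'a.b', 'a.b.c'}), then return the first layer
--     # whose package_prefixes hits that set.
--     candidates = {module_name[:i] for i, ch in enumerate(module_name) if ch == '.'}
--     candidates.add(module_name)
--     for layer_name, package_prefixes in external_layer_config.items():
--         if any(p in candidates for p in package_prefixes):
--             return layer_name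
--     return None
-- ===== Notes on version B (the rewrite author's own statement) =====
-- stated objective: idiomatic
-- what changed: Instead of testing each package prefix with == / startswith, B precomputes the set of dotted-boundary prefixes of module_name once and returns the first layer whose prefix list hits that set.
import Mathlib
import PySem

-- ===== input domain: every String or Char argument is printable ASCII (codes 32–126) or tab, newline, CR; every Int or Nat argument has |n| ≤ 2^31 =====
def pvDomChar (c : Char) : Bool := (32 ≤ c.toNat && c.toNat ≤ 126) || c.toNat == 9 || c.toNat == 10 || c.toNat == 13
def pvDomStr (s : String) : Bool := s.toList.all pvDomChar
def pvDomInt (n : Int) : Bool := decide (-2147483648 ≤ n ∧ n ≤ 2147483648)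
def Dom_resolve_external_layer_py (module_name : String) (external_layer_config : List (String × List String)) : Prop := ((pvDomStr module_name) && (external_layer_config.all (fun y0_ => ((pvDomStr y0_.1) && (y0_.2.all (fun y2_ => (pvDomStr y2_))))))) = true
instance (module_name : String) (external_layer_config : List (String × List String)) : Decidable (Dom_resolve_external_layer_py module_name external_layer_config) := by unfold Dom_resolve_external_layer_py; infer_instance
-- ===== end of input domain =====

-- B replaces the per-prefix ==/startswith tests by one precomputed set of dotted-boundary
-- prefixes of module_name, intersected with each layer's prefix list (objective: idiomatic).

-- ===== PORT A =====
-- inner 'for package_prefix in package_prefixes: if … : return layer_name' as a Bool helper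
def pvAMatch (module_name : String) : List String → Bool
  | [] => false
  | package_prefix :: rest =>
    if module_name == package_prefix
        || PySem.Chars.startswith module_name.toList (package_prefix.toList ++ ['.'])
      -- f"{package_prefix}." is string concatenation; exact as list append on toList
    then true
    else pvAMatch module_name rest

def resolve_external_layer_py (module_name : String) (external_layer_config : List (String × List String)) : Option String :=
  match external_layer_config with
  | [] => none
  | (layer_name, package_prefixes) :: rest =>
    if pvAMatch module_name package_prefixes then some layer_name
    else resolve_external_layer_py module_name rest

-- ===== PORT B =====
-- {module_name[:i] for i, ch in enumerate(module_name) if ch == '.'} then .add(module_name)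
def pvCandidates (m : List Char) : PySem.Set (List Char) :=
  PySem.Set.add
    (PySem.Set.ofList
      ((PySem.List.enumerate m).filterMap
        (fun ic => if ic.2 = '.' then some (PySem.List.slice m none (some ic.1)) else none)))
    m

def pvBGo (cands : PySem.Set (List Char)) : List (String × List String) → Option String
  | [] => none
  | (layer_name, package_prefixes) :: rest =>
    if package_prefixes.any (fun p => PySem.Set.contains cands p.toList) then some layer_name
    else pvBGo cands rest

def resolve_external_layer_py_alt (module_name : String) (external_layer_config : List (String × List String)) : Option String :=
  pvBGo (pvCandidates module_name.toList) external_layer_config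

-- ===== PRECONDITION & SPEC =====
def Spec_resolve_external_layer_py (module_name : String) (external_layer_config : List (String × List String)) (out : Option String) : Prop := out = resolve_external_layer_py_alt module_name external_layer_config
instance (module_name : String) (external_layer_config : List (String × List String)) (out : Option String) : Decidable (Spec_resolve_external_layer_py module_name external_layer_config out) := by unfold Spec_resolve_external_layer_py; infer_instance

-- ===== CLAIM (what is proved, stated in full; the proofs are below) =====
def Claim_equal_resolve_external_layer_py : Prop := ∀ (module_name : String) (external_layer_config : List (String × List String)), Dom_resolve_external_layer_py module_name external_layer_config → Spec_resolve_external_layer_py module_name external_layer_config (resolve_external_layer_py module_name external_layer_config)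

-- ===== LEMMAS AND PROOFS =====

-- membership in the candidate set ↔ Python's (module_name == p or module_name.startswith(p + "."))
theorem mem_pvCandidates (m p : List Char) :
    p ∈ pvCandidates m ↔ (p ++ ['.']) <+: m ∨ m = p := by
  unfold pvCandidates
  rw [PySem.Set.mem_add, PySem.Set.mem_ofList, List.mem_filterMap]
  constructor
  · rintro (⟨ic, hic, h⟩ | h)
    · rw [PySem.List.mem_enumerate_iff] at hic
      obtain ⟨k, hk, rfl⟩ := hic
      simp only [zero_add] at h
      split at h
      · rename_i hdot
        rcases h with ⟨rfl⟩  -- some injectivity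
        left
        rw [PySem.List.slice_to_natCast]
        have : m.take k ++ ['.'] <+: m := by
          have h1 : m.take (k+1) = m.take k ++ [m[k]] := by
            rw [List.take_add_one]; simp [List.getElem?_eq_getElem hk]
          have h2 : m.take (k+1) <+: m := List.take_prefix _ _
          rw [h1, hdot] at h2; exact h2
        exact this
      · exact absurd h (by simp)
    · right; exact h.symm
  · rintro (⟨t, rfl⟩ | rfl)
    · left
      refine ⟨((p.length : Int), '.'), ?_, ?_⟩
      · rw [PySem.List.mem_enumerate_iff]
        refine ⟨p.length, by simp, ?_⟩
        simp
      · simp [PySem.List.slice_to_natCast]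
    · right; rfl

theorem pvMatch_one (m p : String) :
    (m == p || PySem.Chars.startswith m.toList (p.toList ++ ['.'])) =
    PySem.Set.contains (pvCandidates m.toList) p.toList := by
  rw [Bool.eq_iff_iff]
  simp only [Bool.or_eq_true, beq_iff_eq, PySem.Chars.startswith_iff,
    PySem.Set.contains_iff, mem_pvCandidates]
  constructor
  · rintro (rfl | h)
    exacts [Or.inr rfl, Or.inl h]
  · rintro (h | h)
    exacts [Or.inr h, Or.inl (String.toList_inj.mp h)]

theorem pvAMatch_eq (m : String) (ps : List String) :
    pvAMatch m ps = ps.any (fun p => PySem.Set.contains (pvCandidates m.toList) p.toList) := by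
  induction ps with
  | nil => rfl
  | cons p rest ih =>
    simp only [pvAMatch, List.any_cons, ih, pvMatch_one]
    cases hc : PySem.Set.contains (pvCandidates m.toList) p.toList <;> simp

theorem resolve_external_layer_py_spec : Claim_equal_resolve_external_layer_py := by
  intro m cfg hDom
  show resolve_external_layer_py m cfg = resolve_external_layer_py_alt m cfg
  unfold resolve_external_layer_py_alt
  clear hDom
  induction cfg with
  | nil => rfl
  | cons hd rest ih =>
    obtain ⟨layer, prefixes⟩ := hd
    simp only [resolve_external_layer_py, pvBGo, pvAMatch_eq]
    rw [ih]
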